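-- pv_equiv track=rewrite | github.com/takashiharano/util | python/util.py | align_by_tab
-- ===== SOURCE A (Python) =====
-- def typename(obj):
--     return type(obj).__name__
--
-- def rpad(s, ch, ln, adj=False):
--     r = str(s)
--     d = ln - lenw(r)
--     if d <= 0:
--         return r
--     pd = repeat_chr(ch, d)
--     r += pd
--     if adj:
--         r = r[0:ln]
--     return r
--
-- def repeat_chr(c, n):
--     s = ''
--     for i in range(n):
--         s += c
--     return s
--
-- def convert_newline(s, nl):
--     return s.replace('\r\n', '\n').replace('\r', '\n').replace('\n', nl)
--
-- def lenw(s):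
--     n = 0
--     for i in range(len(s)):
--         p = ord(s[i])
--         if p <= 0x7F or p >= 0xFF61 and p <= 0xFF9F:
--             n += 1
--         else:
--             n += 2
--     return n
--
-- def text2list(text):
--     text = convert_newline(text, '\n')
--     a = text.split('\n')
--     if len(a) >= 2 and a[-1] == '':
--         del a[-1]
--     return a
--
-- def align_by_tab(s, n=2):
--     a = s
--     if typename(s) == 'str':
--         a = text2list(s)
--
--     d = ' '
--     c = []
--     for i in range(len(a)):
--       l = a[i].split('\t')
--       for j in range(len(l)):
--           if len(c) < j + 1:
--               c.append(0)
--           b = lenw(l[j])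
--           if c[j] < b:
--               c[j] = b
--
--     r = ''
--     for i in range(len(a)):
--         l = a[i].split('\t')
--         col = 0
--         for j in range(len(l) - 1):
--             r += rpad(l[j], d, c[j] + n)
--             col += 1
--
--         r += l[col] + '\n'
--
--     return r
-- ===== SOURCE B (Python) =====
-- def _w(s):
--     return sum(2 - (ord(ch) <= 0x7F or 0xFF61 <= ord(ch) <= 0xFF9F) for ch in s)
--
-- def align_by_tab(s, n=2):
--     a = s
--     if type(s).__name__ == 'str':
--         a = s.replace('\r\n', '\n').replace('\r', '\n').split('\n')
--         if len(a) >= 2 and a[-1] == '':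
--             a.pop()
--     rows = [line.split('\t') for line in a]
--     ncols = max(map(len, rows), default=0)
--     # build every line right-to-left, one whole column per step
--     acc = ['\n'] * len(rows)
--     for j in range(ncols - 1, -1, -1):
--         w = max((_w(row[j]) for row in rows if j < len(row)), default=0)
--         acc = [((row[j] + ' ' * (w + n - _w(row[j])) if j < len(row) - 1 else row[j]) + tail)
--                if j < len(row) else tail
--                for tail, row in zip(acc, rows)]
--     return ''.join(acc)
-- ===== Notes on version B (the rewrite author's own statement) =====
-- stated objective: alternative
-- what changed: B builds the output column-major and right-to-left: it keeps one suffix-string accumulator per line and, for each column from the last down to the first, computes that column's max width and prepends the whole padded column to every line's suffix at once, finally joining the suffixes; A instead grows a mutable width table row-major and then emits the text line by line with a per-row padding loop.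
import Mathlib
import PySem

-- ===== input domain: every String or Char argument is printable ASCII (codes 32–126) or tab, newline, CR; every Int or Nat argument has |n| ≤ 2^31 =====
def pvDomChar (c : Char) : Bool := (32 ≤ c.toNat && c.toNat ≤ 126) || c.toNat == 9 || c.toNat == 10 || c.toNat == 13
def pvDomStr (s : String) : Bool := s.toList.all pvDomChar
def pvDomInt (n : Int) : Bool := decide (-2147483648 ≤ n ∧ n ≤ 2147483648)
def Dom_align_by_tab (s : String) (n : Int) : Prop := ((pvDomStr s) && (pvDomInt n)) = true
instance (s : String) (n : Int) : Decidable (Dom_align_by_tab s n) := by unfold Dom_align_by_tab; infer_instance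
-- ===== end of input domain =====

-- B builds the output column-major and right-to-left: one per-line suffix accumulator, prepending a
-- whole padded column per step, instead of A's row-major width table plus per-row padding loop (alternative; same cost).

-- ===== PORT A =====
def pvLenw (cs : List Char) : Int :=
  (List.range cs.length).foldl (fun nn i =>
    let p := (cs.getD i ' ').toNat
    if p ≤ 0x7F ∨ (0xFF61 ≤ p ∧ p ≤ 0xFF9F) then nn + 1 else nn + 2) 0

def pvRepeatChr (c : Char) (nn : Int) : List Char :=
  (PySem.List.pyRange 0 nn 1).foldl (fun s _ => s ++ [c]) []

def pvRpad (s : List Char) (ch : Char) (ln : Int) (adj : Bool) : List Char :=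
  let r := s
  let d := ln - pvLenw r
  if d ≤ 0 then r
  else
    let pd := pvRepeatChr ch d
    let r := r ++ pd
    if adj then PySem.List.slice r (some 0) (some ln) else r

def pvConvertNewline (s nl : List Char) : List Char :=
  PySem.Chars.replace (PySem.Chars.replace (PySem.Chars.replace s ['\r','\n'] ['\n']) ['\r'] ['\n']) ['\n'] nl

def pvText2list (text : List Char) : List (List Char) :=
  let text' := pvConvertNewline text ['\n']
  let a := PySem.Chars.splitOn text' ['\n']
  if 2 ≤ a.length ∧ a.getLast? = some [] then a.dropLast else a

def align_by_tab (s : String) (n : Int) : String :=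
  let a := pvText2list s.toList
  let d := ' '
  let c : List Int := a.foldl (fun c line =>
    let l := PySem.Chars.splitOn line ['\t']
    (List.range l.length).foldl (fun c j =>
      let c' := if c.length < j + 1 then c ++ [(0 : Int)] else c
      let b := pvLenw (l.getD j [])
      if c'.getD j 0 < b then c'.set j b else c') c) []
  let r : List Char := a.foldl (fun r line =>
    let l := PySem.Chars.splitOn line ['\t']
    let rc := (List.range (l.length - 1)).foldl (fun (rc : List Char × Nat) j =>
      (rc.1 ++ pvRpad (l.getD j []) d (c.getD j 0 + n) false, rc.2 + 1)) (r, 0)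
    rc.1 ++ l.getD rc.2 [] ++ ['\n']) []
  String.ofList r

-- ===== PORT B =====
def pvW (cs : List Char) : Int :=
  (cs.map (fun ch =>
    2 - (if ch.toNat ≤ 0x7F ∨ (0xFF61 ≤ ch.toNat ∧ ch.toNat ≤ 0xFF9F) then (1 : Int) else 0))).sum

def align_by_tab_alt (s : String) (n : Int) : String :=
  let a0 := PySem.Chars.splitOn
    (PySem.Chars.replace (PySem.Chars.replace s.toList ['\r','\n'] ['\n']) ['\r'] ['\n']) ['\n']
  let a := if 2 ≤ a0.length ∧ a0.getLast? = some [] then a0.dropLast else a0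
  let rows := a.map (fun line => PySem.Chars.splitOn line ['\t'])
  let ncols : Nat := PySem.List.maxD (rows.map List.length) id 0
  let acc0 : List (List Char) := List.replicate rows.length ['\n']
  -- range(ncols-1, -1, -1) visits ncols-1, …, 0: ported as (List.range ncols).reverse (exactly that index sequence)
  -- the list comprehension over zip(acc, rows) is the map over acc.zip rows; ' ' * k with k < 0 is '' (Int.toNat)
  let acc := (List.range ncols).reverse.foldl (fun acc j =>
    let w := PySem.List.maxD ((rows.filter (fun row => decide (j < row.length))).map
      (fun row => pvW (row.getD j []))) id 0
    (acc.zip rows).map (fun tr =>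
      if j < tr.2.length then
        (if j < tr.2.length - 1 then
          tr.2.getD j [] ++ List.replicate (w + n - pvW (tr.2.getD j [])).toNat ' '
        else tr.2.getD j []) ++ tr.1
      else tr.1)) acc0
  String.ofList (PySem.Chars.join [] acc)

-- ===== PRECONDITION & SPEC =====
def Spec_align_by_tab (s : String) (n : Int) (out : String) : Prop := out = align_by_tab_alt s n
instance (s : String) (n : Int) (out : String) : Decidable (Spec_align_by_tab s n out) := by unfold Spec_align_by_tab; infer_instance

-- ===== CLAIM (what is proved, stated in full; the proofs are below) =====
def Claim_equal_align_by_tab : Prop := ∀ (s : String) (n : Int), Dom_align_by_tab s n → Spec_align_by_tab s n (align_by_tab s n)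

-- ===== LEMMAS AND PROOFS =====

-- replace with a single-char pattern equal to its replacement is the identity
theorem replaceGo_single (c : Char) : ∀ (fuel : Nat) (l acc : List Char),
    PySem.Chars.replace.go [c] [c] fuel l acc = acc.reverse ++ l := by
  intro fuel
  induction fuel with
  | zero => intro l acc; rw [PySem.Chars.replace.go]
  | succ f ih =>
    intro l acc
    cases l with
    | nil => rw [PySem.Chars.replace.go]; simp; omega
    | cons x t =>
      rw [PySem.Chars.replace.go]
      by_cases hx : x = c
      · subst hx
        simp [List.isPrefixOf, ih]
      · have : List.isPrefixOf [c] (x :: t) = false := by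
          simp [List.isPrefixOf]
          intro h; exact hx (by simpa using h.symm)
        simp [this, ih]

theorem replace_single_self (c : Char) (s : List Char) :
    PySem.Chars.replace s [c] [c] = s := by
  rw [PySem.Chars.replace]
  simp [replaceGo_single]

theorem splitOnGo_ne_nil (sep : List Char) : ∀ (fuel : Nat) (l cur : List Char)
    (acc : List (List Char)), PySem.Chars.splitOn.go sep fuel l cur acc ≠ [] := by
  intro fuel
  induction fuel with
  | zero => intro l cur acc; rw [PySem.Chars.splitOn.go]; simp
  | succ f ih =>
    intro l cur acc
    cases l with
    | nil => rw [PySem.Chars.splitOn.go]; simp; omega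
    | cons x t =>
      rw [PySem.Chars.splitOn.go]
      by_cases h : List.isPrefixOf sep (x :: t)
      · simp [h, ih]
      · simp [h, ih]

theorem splitOn_ne_nil (s sep : List Char) : PySem.Chars.splitOn s sep ≠ [] := by
  rw [PySem.Chars.splitOn]; exact splitOnGo_ne_nil sep _ s [] []

theorem join_nil_flatten (ps : List (List Char)) : PySem.Chars.join [] ps = ps.flatten := by
  simp [PySem.Chars.join, List.intercalate]
  induction ps with
  | nil => simp
  | cons p ps ih => cases ps <;> simp_all [List.intersperse]

theorem map_range_getD (cs : List Char) (d : Char) :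
    (List.range cs.length).map (fun i => cs.getD i d) = cs := by
  apply List.ext_getElem
  · simp
  · intro i h1 h2
    simp [List.getD_eq_getElem?_getD, List.getElem?_eq_getElem h2]

theorem foldl_range_getD (g : Char → Int) (cs : List Char) :
    (List.range cs.length).foldl (fun nn i => nn + g (cs.getD i ' ')) 0 = (cs.map g).sum := by
  have h1 : (List.range cs.length).foldl (fun nn i => nn + g (cs.getD i ' ')) 0
      = ((List.range cs.length).map (fun i => cs.getD i ' ')).foldl (fun a x => a + g x) 0 := by
    rw [List.foldl_map]
  rw [h1, map_range_getD, List.sum_eq_foldl, List.foldl_map]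

theorem pvW_nonneg (cs : List Char) : 0 ≤ pvW cs := by
  unfold pvW
  induction cs with
  | nil => simp
  | cons c t ih => simp only [List.map_cons, List.sum_cons]; split_ifs <;> omega

theorem lenw_eq_w (cs : List Char) : pvLenw cs = pvW cs := by
  unfold pvLenw pvW
  have hf : (fun (nn : Int) (i : Nat) =>
      let p := (cs.getD i ' ').toNat
      if p ≤ 0x7F ∨ (0xFF61 ≤ p ∧ p ≤ 0xFF9F) then nn + 1 else nn + 2)
      = fun nn i => nn + (fun ch : Char =>
          if ch.toNat ≤ 0x7F ∨ (0xFF61 ≤ ch.toNat ∧ ch.toNat ≤ 0xFF9F) then (1:Int) else 2)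
        (cs.getD i ' ') := by
    funext nn i; simp only []; split_ifs <;> rfl
  rw [hf]
  rw [foldl_range_getD (fun ch : Char =>
    if ch.toNat ≤ 0x7F ∨ (0xFF61 ≤ ch.toNat ∧ ch.toNat ≤ 0xFF9F) then (1:Int) else 2)]
  congr 1
  apply List.map_congr_left
  intro ch _
  split_ifs <;> omega

theorem foldl_append_const {α : Type} (c : Char) (xs : List α) : ∀ acc : List Char,
    xs.foldl (fun s _ => s ++ [c]) acc = acc ++ List.replicate xs.length c := by
  induction xs with
  | nil => simp
  | cons x t ih =>
    intro acc
    simp only [List.foldl_cons, ih, List.length_cons]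
    rw [List.append_assoc]
    congr 1

theorem repeatChr_eq (c : Char) (d : Int) : pvRepeatChr c d = List.replicate d.toNat c := by
  unfold pvRepeatChr
  rw [foldl_append_const]
  cases d with
  | ofNat m => simp [PySem.List.pyRange_zero_natCast]
  | negSucc m => simp [PySem.List.pyRange]

theorem rpad_eq (f : List Char) (t : Int) :
    pvRpad f ' ' t false = f ++ List.replicate (t - pvW f).toNat ' ' := by
  unfold pvRpad
  simp only [lenw_eq_w, repeatChr_eq, Bool.false_eq_true, if_false]
  split_ifs with h
  · have h0 : (t - pvW f).toNat = 0 := by omega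
    simp [h0]
  · rfl

theorem max?_id_eq {κ : Type} [LinearOrder κ] : ∀ (t : List κ) (x : κ),
    PySem.List.max? (x :: t) id = some (t.foldl max x) := by
  intro t
  induction t with
  | nil => intro x; simp [PySem.List.max?]
  | cons y t ih =>
    intro x
    have step : PySem.List.max? (x :: y :: t) id = PySem.List.max? (max x y :: t) id := by
      simp only [PySem.List.max?, List.foldl_cons, id_eq]
      congr 1
      split_ifs with h
      · rw [max_eq_right h.le]
      · rw [max_eq_left (not_lt.mp h)]
    rw [step, ih, List.foldl_cons]

theorem maxD_foldl {κ : Type} [LinearOrder κ] (xs : List κ) (d : κ)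
    (h : ∀ x ∈ xs, d ≤ x) : PySem.List.maxD xs id d = xs.foldl max d := by
  cases xs with
  | nil => simp [PySem.List.maxD, PySem.List.max?]
  | cons x t =>
    unfold PySem.List.maxD
    rw [max?_id_eq, Option.getD_some, List.foldl_cons,
      max_eq_right (h x (by simp))]

-- A's column-width fold, written pointwise
def pvColW (rows : List (List (List Char))) (j : Nat) : Int :=
  rows.foldl (fun m row => if j < row.length then max m (pvW (row.getD j [])) else m) 0

-- A's inner width-update loop, characterised pointwise
theorem innerA_spec (l : List (List Char)) : ∀ (k : Nat) (c : List Int),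
    (((List.range k).foldl (fun c j =>
      let c' := if c.length < j + 1 then c ++ [(0 : Int)] else c
      let b := pvLenw (l.getD j [])
      if c'.getD j 0 < b then c'.set j b else c') c).length = max c.length k)
    ∧ ∀ j : Nat, ((List.range k).foldl (fun c j =>
      let c' := if c.length < j + 1 then c ++ [(0 : Int)] else c
      let b := pvLenw (l.getD j [])
      if c'.getD j 0 < b then c'.set j b else c') c).getD j 0
      = if j < k then max (c.getD j 0) (pvLenw (l.getD j [])) else c.getD j 0 := by
  intro k
  induction k with
  | zero => intro c; simp
  | succ k ih =>
    intro c
    obtain ⟨ihlen, ihget⟩ := ih c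
    rw [List.range_succ, List.foldl_append, List.foldl_cons, List.foldl_nil]
    set c1 := (List.range k).foldl (fun c j =>
      let c' := if c.length < j + 1 then c ++ [(0 : Int)] else c
      let b := pvLenw (l.getD j [])
      if c'.getD j 0 < b then c'.set j b else c') c with hc1
    simp only []
    have hklen : k ≤ c1.length := by omega
    set c2 := if c1.length < k + 1 then c1 ++ [(0 : Int)] else c1 with hc2
    have hlen2 : c2.length = max c1.length (k + 1) := by
      rw [hc2]; split_ifs with h <;> simp <;> omega
    have hget2 : ∀ j : Nat, c2.getD j 0 = c1.getD j 0 := by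
      intro j
      rw [hc2]; split_ifs with h
      · have hc1k : c1.length = k := by omega
        rcases lt_trichotomy j k with hj | hj | hj
        · rw [List.getD_append _ _ _ _ (by omega)]
        · subst hj
          simp [List.getD_eq_getElem?_getD, hc1k]
        · simp [List.getD_eq_getElem?_getD]
          rw [List.getElem?_eq_none_iff.mpr (by simp; omega),
            List.getElem?_eq_none_iff.mpr (by omega)]
      · rfl
    have hkc2 : k < c2.length := by omega
    constructor
    · split_ifs with h <;> simp [hlen2] <;> omega
    · intro j
      have hres : ∀ j : Nat,
          (if c2.getD k 0 < pvLenw (l.getD k []) then c2.set k (pvLenw (l.getD k [])) else c2).getD j 0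
          = if j = k then max (c2.getD k 0) (pvLenw (l.getD k [])) else c2.getD j 0 := by
        intro j
        by_cases hjk : j = k
        · subst hjk
          rw [if_pos rfl]
          split_ifs with h
          · rw [max_eq_right (le_of_lt h)]
            simp [List.getD_eq_getElem?_getD, hkc2]
          · rw [max_eq_left (not_lt.mp h)]
        · rw [if_neg hjk]
          split_ifs with h
          · simp [List.getD_eq_getElem?_getD, Ne.symm hjk]
          · rfl
      rw [hres j, hget2 j, ihget j]
      rcases Nat.lt_trichotomy j k with hj | hj | hj
      · simp only [if_pos hj, if_neg (by omega : ¬ j = k), if_pos (by omega : j < k + 1)]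
      · subst hj
        rw [if_pos rfl, hget2 j, ihget j]
        simp only [if_neg (Nat.lt_irrefl j), if_pos (Nat.lt_succ_self j)]
      · rw [if_neg (by omega : ¬ j = k), if_neg (by omega : ¬ j < k), if_neg (by omega : ¬ j < k + 1)]

-- A's outer width fold, pointwise
theorem outerA_spec : ∀ (rows : List (List (List Char))) (c : List Int) (j : Nat),
    (rows.foldl (fun c l => (List.range l.length).foldl (fun c j =>
        let c' := if c.length < j + 1 then c ++ [(0 : Int)] else c
        let b := pvLenw (l.getD j [])
        if c'.getD j 0 < b then c'.set j b else c') c) c).getD j 0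
    = rows.foldl (fun m row => if j < row.length then max m (pvW (row.getD j [])) else m)
        (c.getD j 0) := by
  intro rows
  induction rows with
  | nil => intro c j; rfl
  | cons row rows ih =>
    intro c j
    simp only [List.foldl_cons]
    rw [ih]
    have h0 := (innerA_spec row row.length c).2 j
    rw [lenw_eq_w] at h0
    congr 1

-- B's per-column max expression equals A's column fold, for EVERY column index
theorem width_eq (rows : List (List (List Char))) (j : Nat) :
    PySem.List.maxD ((rows.filter (fun row => decide (j < row.length))).map
      (fun row => pvW (row.getD j []))) id 0 = pvColW rows j := by
  rw [maxD_foldl _ _ ?nonneg]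
  case nonneg =>
    intro x hx
    simp only [List.mem_map] at hx
    obtain ⟨row, _, hrow⟩ := hx
    rw [← hrow]; exact pvW_nonneg _
  rw [List.foldl_map, List.foldl_filter]
  apply PySem.List.foldl_congr_mem
  intro acc row _
  by_cases h : j < row.length <;> simp [h]

-- the per-line suffix built from column j onward
def pvSuf (n : Int) (c : List Int) (row : List (List Char)) (j : Nat) : List Char :=
  ((List.range' j (row.length - 1 - j)).map (fun k =>
    row.getD k [] ++ List.replicate (c.getD k 0 + n - pvW (row.getD k [])).toNat ' ')).flatten
  ++ (if j ≤ row.length - 1 then row.getD (row.length - 1) [] else []) ++ ['\n']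

theorem pvSuf_ge (n : Int) (c : List Int) (row : List (List Char)) (j : Nat)
    (hne : row ≠ []) (hj : row.length ≤ j) : pvSuf n c row j = ['\n'] := by
  have hl : 0 < row.length := List.length_pos_iff.mpr hne
  unfold pvSuf
  rw [if_neg (by omega)]
  have : row.length - 1 - j = 0 := by omega
  simp [this]

-- one column step, per row
theorem pvSuf_step (n : Int) (c : List Int) (row : List (List Char)) (j : Nat) (hne : row ≠ []) :
    (if j < row.length then
      (if j < row.length - 1 then
        row.getD j [] ++ List.replicate (c.getD j 0 + n - pvW (row.getD j [])).toNat ' '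
      else row.getD j []) ++ pvSuf n c row (j + 1)
    else pvSuf n c row (j + 1)) = pvSuf n c row j := by
  have hl : 0 < row.length := List.length_pos_iff.mpr hne
  by_cases h1 : j < row.length
  · rw [if_pos h1]
    by_cases h2 : j < row.length - 1
    · rw [if_pos h2]
      unfold pvSuf
      have hcnt : row.length - 1 - j = (row.length - 1 - (j + 1)) + 1 := by omega
      rw [hcnt, List.range'_succ, List.map_cons, List.flatten_cons,
        if_pos (by omega : j ≤ row.length - 1), if_pos (by omega : j + 1 ≤ row.length - 1)]
      simp [List.append_assoc]
    · have hj : j = row.length - 1 := by omega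
      rw [if_neg h2, pvSuf_ge n c row (j+1) hne (by omega)]
      unfold pvSuf
      rw [if_pos (by omega)]
      have : row.length - 1 - j = 0 := by omega
      simp [hj]
  · rw [if_neg h1, pvSuf_ge n c row (j+1) hne (by omega),
      pvSuf_ge n c row j hne (by omega)]

-- B's descending column fold builds exactly the per-row suffixes
theorem foldB (rows : List (List (List Char))) (c : List Int) (n : Int)
    (hne : ∀ row ∈ rows, row ≠ [])
    (hw : ∀ j : Nat, PySem.List.maxD ((rows.filter (fun row => decide (j < row.length))).map
      (fun row => pvW (row.getD j []))) id 0 = c.getD j 0) :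
    ∀ m : Nat,
    (List.range m).reverse.foldl (fun acc j =>
      let w := PySem.List.maxD ((rows.filter (fun row => decide (j < row.length))).map
        (fun row => pvW (row.getD j []))) id 0
      (acc.zip rows).map (fun tr =>
        if j < tr.2.length then
          (if j < tr.2.length - 1 then
            tr.2.getD j [] ++ List.replicate (w + n - pvW (tr.2.getD j [])).toNat ' '
          else tr.2.getD j []) ++ tr.1
        else tr.1)) (rows.map (fun row => pvSuf n c row m))
    = rows.map (fun row => pvSuf n c row 0) := by
  intro m
  induction m with
  | zero => simp
  | succ m ih =>
    rw [List.range_succ, List.reverse_append, List.reverse_singleton, List.singleton_append,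
      List.foldl_cons]
    have hstep : (let w := PySem.List.maxD ((rows.filter (fun row => decide (m < row.length))).map
        (fun row => pvW (row.getD m []))) id 0
      (((rows.map (fun row => pvSuf n c row (m+1))).zip rows).map (fun tr =>
        if m < tr.2.length then
          (if m < tr.2.length - 1 then
            tr.2.getD m [] ++ List.replicate (w + n - pvW (tr.2.getD m [])).toNat ' '
          else tr.2.getD m []) ++ tr.1
        else tr.1)))
      = rows.map (fun row => pvSuf n c row m) := by
      simp only [hw m]
      have hzip : (rows.map (fun row => pvSuf n c row (m+1))).zip rows
          = rows.map (fun row => (pvSuf n c row (m+1), row)) := by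
        have h := @List.zip_map' _ _ _ (fun row => pvSuf n c row (m+1)) (fun row => row) rows
        simpa using h
      rw [hzip, List.map_map]
      apply List.map_congr_left
      intro row hrow
      simpa using pvSuf_step n c row m (hne row hrow)
    rw [hstep, ih]

-- A's output fold is the concatenation of the per-row suffixes from column 0
theorem foldl_append_flatten {α : Type} (g : α → List Char) :
    ∀ (rows : List α) (init : List Char),
    rows.foldl (fun r row => r ++ g row) init = init ++ (rows.map g).flatten := by
  intro rows
  induction rows with
  | nil => simp
  | cons row rows ih => intro init; simp [ih, List.append_assoc]

-- A's inner output loop: pair fold = concatenation of the padded pieces, counter = k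
theorem pairfoldA (p : Nat → List Char) : ∀ (k : Nat) (r0 : List Char) (c0 : Nat),
    (List.range k).foldl (fun (rc : List Char × Nat) j => (rc.1 ++ p j, rc.2 + 1)) (r0, c0)
    = (r0 ++ ((List.range k).map p).flatten, c0 + k) := by
  intro k
  induction k with
  | zero => intro r0 c0; simp
  | succ k ih =>
    intro r0 c0
    rw [List.range_succ, List.foldl_append, List.foldl_cons, List.foldl_nil, ih,
      List.map_append]
    simp
    omega

theorem outA (c : List Int) (n : Int) (rows : List (List (List Char)))
    (hne : ∀ row ∈ rows, row ≠ []) :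
    rows.foldl (fun r l =>
      let rc := (List.range (l.length - 1)).foldl (fun (rc : List Char × Nat) j =>
        (rc.1 ++ pvRpad (l.getD j []) ' ' (c.getD j 0 + n) false, rc.2 + 1)) (r, 0)
      rc.1 ++ l.getD rc.2 [] ++ ['\n']) []
    = (rows.map (fun row => pvSuf n c row 0)).flatten := by
  have hbody : ∀ row ∈ rows, ∀ r : List Char,
      (let rc := (List.range (row.length - 1)).foldl (fun (rc : List Char × Nat) j =>
        (rc.1 ++ pvRpad (row.getD j []) ' ' (c.getD j 0 + n) false, rc.2 + 1)) (r, 0)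
      rc.1 ++ row.getD rc.2 [] ++ ['\n']) = r ++ pvSuf n c row 0 := by
    intro row hrow r
    have hl : 0 < row.length := List.length_pos_iff.mpr (hne row hrow)
    simp only [pairfoldA]
    unfold pvSuf
    rw [if_pos (by omega), Nat.zero_add, Nat.sub_zero, ← List.range_eq_range']
    have hp : (fun j => pvRpad (row.getD j []) ' ' (c.getD j 0 + n) false)
        = fun k => row.getD k [] ++ List.replicate (c.getD k 0 + n - pvW (row.getD k [])).toNat ' ' := by
      funext j; rw [rpad_eq]
    rw [hp]
    simp [List.append_assoc]
  calc rows.foldl (fun r l =>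
      let rc := (List.range (l.length - 1)).foldl (fun (rc : List Char × Nat) j =>
        (rc.1 ++ pvRpad (l.getD j []) ' ' (c.getD j 0 + n) false, rc.2 + 1)) (r, 0)
      rc.1 ++ l.getD rc.2 [] ++ ['\n']) []
      = rows.foldl (fun r row => r ++ pvSuf n c row 0) [] := by
        apply PySem.List.foldl_congr_mem
        intro r row hrow
        exact hbody row hrow r
    _ = (rows.map (fun row => pvSuf n c row 0)).flatten := by
        rw [foldl_append_flatten]; rfl

theorem main_eq (s : String) (n : Int) : align_by_tab s n = align_by_tab_alt s n := by
  simp only [align_by_tab, align_by_tab_alt, pvText2list, pvConvertNewline]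
  rw [replace_single_self]
  set t := PySem.Chars.splitOn
    (PySem.Chars.replace (PySem.Chars.replace s.toList ['\r','\n'] ['\n']) ['\r'] ['\n']) ['\n'] with ht
  set a := if 2 ≤ t.length ∧ t.getLast? = some [] then t.dropLast else t with ha
  set rows := a.map (fun line => PySem.Chars.splitOn line ['\t']) with hrows
  have hne : ∀ row ∈ rows, row ≠ [] := by
    intro row hrow
    rw [hrows] at hrow
    obtain ⟨line, _, hline⟩ := List.mem_map.mp hrow
    rw [← hline]
    exact splitOn_ne_nil _ _
  -- A's two folds over the raw lines are the corresponding folds over rows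
  have hfc : a.foldl (fun c line =>
      let l := PySem.Chars.splitOn line ['\t']
      (List.range l.length).foldl (fun c j =>
        let c' := if c.length < j + 1 then c ++ [(0 : Int)] else c
        let b := pvLenw (l.getD j [])
        if c'.getD j 0 < b then c'.set j b else c') c) ([] : List Int)
      = rows.foldl (fun c l => (List.range l.length).foldl (fun c j =>
        let c' := if c.length < j + 1 then c ++ [(0 : Int)] else c
        let b := pvLenw (l.getD j [])
        if c'.getD j 0 < b then c'.set j b else c') c) ([] : List Int) := by
    rw [hrows, List.foldl_map]
  rw [hfc]
  set c := rows.foldl (fun c l => (List.range l.length).foldl (fun c j =>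
        let c' := if c.length < j + 1 then c ++ [(0 : Int)] else c
        let b := pvLenw (l.getD j [])
        if c'.getD j 0 < b then c'.set j b else c') c) ([] : List Int) with hc
  have hw : ∀ j : Nat, PySem.List.maxD ((rows.filter (fun row => decide (j < row.length))).map
      (fun row => pvW (row.getD j []))) id 0 = c.getD j 0 := by
    intro j
    rw [hc, outerA_spec, width_eq]
    rfl
  have hfr : a.foldl (fun r line =>
      let l := PySem.Chars.splitOn line ['\t']
      let rc := (List.range (l.length - 1)).foldl (fun (rc : List Char × Nat) j =>
        (rc.1 ++ pvRpad (l.getD j []) ' ' (c.getD j 0 + n) false, rc.2 + 1)) (r, 0)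
      rc.1 ++ l.getD rc.2 [] ++ ['\n']) ([] : List Char)
      = rows.foldl (fun r l =>
      let rc := (List.range (l.length - 1)).foldl (fun (rc : List Char × Nat) j =>
        (rc.1 ++ pvRpad (l.getD j []) ' ' (c.getD j 0 + n) false, rc.2 + 1)) (r, 0)
      rc.1 ++ l.getD rc.2 [] ++ ['\n']) ([] : List Char) := by
    rw [hrows, List.foldl_map]
  rw [hfr, outA c n rows hne]
  -- B's side
  set ncols : Nat := PySem.List.maxD (rows.map List.length) id 0 with hncols
  have hlen : ∀ row ∈ rows, row.length ≤ ncols := by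
    intro row hrow
    rw [hncols, maxD_foldl _ _ (by intro x _; exact Nat.zero_le x), List.foldl_map]
    exact (PySem.List.le_foldl_max_nat rows List.length 0).2 row hrow
  have hinit : List.replicate rows.length (['\n'] : List Char)
      = rows.map (fun row => pvSuf n c row ncols) := by
    rw [← List.map_const']
    apply List.map_congr_left
    intro row hrow
    exact (pvSuf_ge n c row ncols (hne row hrow) (hlen row hrow)).symm
  rw [hinit, foldB rows c n hne hw ncols, join_nil_flatten]

-- ===== VERDICT (by name: the statement is the Claim_ definition above) =====
theorem align_by_tab_spec : Claim_equal_align_by_tab := by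
  intro s n _hdom
  exact main_eq s n
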